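-- pv_equiv track=rewrite | github.com/MikeAlwaysCode/algorithm_py | Contests/LeetCodePython/1040.移动石子直到连续-ii.py | numMovesStonesII
-- ===== SOURCE A (Python) =====
-- from typing import List
--
-- def numMovesStonesII(stones: List[int]) -> List[int]:
--     n = len(stones)
--     stones.sort()
--     ans = [0, 0]
--     ans[1] = max(stones[-1] - stones[1] + 1, stones[-2] - stones[0] + 1) - (n - 1)
--     ans[0] = n
--     j = 0
--     for i in range(n):
--         while j + 1 < n and stones[j + 1] - stones[i] + 1 <= n:
--             j += 1
--         if j - i + 1 == n -1 and stones[j] - stones[i] + 1 == n - 1: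
--             ans[0] = min(ans[0], 2)
--         else:
--             ans[0] = min(ans[0], n - j + i - 1)
--     return ans
-- ===== SOURCE B (Python) =====
-- def numMovesStonesII(stones):
--     stones.sort()
--     n = len(stones)
--
--     def below(x, lo, hi):
--         # lo + number of stones <= x among stones[lo:hi]  (recursive bisect_right)
--         if lo >= hi:
--             return lo
--         mid = (lo + hi) // 2
--         if stones[mid] <= x:
--             return below(x, mid + 1, hi)
--         return below(x, lo, mid)
--
--     best = n
--     for i, v in enumerate(stones):
--         c = below(v + n - 1, 0, n) - i
--         if c == n - 1 and stones[i + c - 1] - v == n - 2: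
--             best = min(best, 2)
--         else:
--             best = min(best, n - c)
--     return [best, max(stones[-1] - stones[1], stones[-2] - stones[0]) - n + 2]
-- ===== Notes on version B (the rewrite author's own statement) =====
-- stated objective: alternative
-- what changed: A's stateful two-pointer scan (a carried-over pointer j advanced by an inner while-loop) is replaced by a stateless per-stone window count via a recursive bisect_right helper, so the inner pointer loop and the (ans, j) state disappear; the max-moves closed form is kept.
import Mathlib
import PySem

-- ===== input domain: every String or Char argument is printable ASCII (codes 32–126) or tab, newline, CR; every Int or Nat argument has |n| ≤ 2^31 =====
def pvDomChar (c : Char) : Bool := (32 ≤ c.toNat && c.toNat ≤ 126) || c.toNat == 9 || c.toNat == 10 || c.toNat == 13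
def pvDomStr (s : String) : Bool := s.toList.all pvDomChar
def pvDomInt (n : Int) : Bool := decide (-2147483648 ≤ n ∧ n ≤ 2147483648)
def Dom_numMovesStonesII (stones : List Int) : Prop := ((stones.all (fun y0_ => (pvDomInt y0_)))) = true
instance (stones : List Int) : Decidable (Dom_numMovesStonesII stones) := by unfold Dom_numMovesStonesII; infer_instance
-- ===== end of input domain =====

-- B replaces A's amortised two-pointer inner while-loop by a stateless per-stone count of
-- the stones inside each window (a recursive bisect_right); both sort `stones` in place in
-- Python — the equivalence proved here is about the return value only.

-- s[i] for an index the guards keep in range (exact there; out of range Python would raise)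
def pyIdx (s : List Int) (i : Int) : Int := (PySem.List.pyGet? s i).getD 0

-- ===== PORT A =====
-- the inner `while j + 1 < n and stones[j+1] - stones[i] + 1 <= n: j += 1`
def advA (s : List Int) (si : Int) (n : Nat) (j : Nat) : Nat :=
  if h : j + 1 < n ∧ pyIdx s ((j : Int) + 1) - si + 1 ≤ (n : Int) then
    advA s si n (j + 1)
  else j
termination_by n - j
decreasing_by omega

-- the body of A's `for i in range(n)` loop; state = (ans[0], j)
def stepA (s : List Int) (n : Nat) (st : Int × Nat) (i : Nat) : Int × Nat :=
  let j := advA s (pyIdx s (i : Int)) n st.2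
  if ((j : Int) - (i : Int) + 1 = (n : Int) - 1) ∧
     (pyIdx s (j : Int) - pyIdx s (i : Int) + 1 = (n : Int) - 1) then
    (min st.1 2, j)
  else
    (min st.1 ((n : Int) - (j : Int) + (i : Int) - 1), j)

def numMovesStonesII (stones : List Int) : List Int :=
  let n := stones.length
  let s := PySem.List.sorted stones (fun x => x) false
  let ans1 := max (pyIdx s (-1) - pyIdx s 1 + 1) (pyIdx s (-2) - pyIdx s 0 + 1) - ((n : Int) - 1)
  let res := (List.range n).foldl (stepA s n) ((n : Int), 0)
  [res.1, ans1]

-- ===== PORT B =====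
-- `below(x, lo, hi)`: lo + number of stones ≤ x among stones[lo:hi] (recursive bisect_right)
def below (s : List Int) (x : Int) (lo hi : Nat) : Nat :=
  if lo < hi then
    let mid := (lo + hi) / 2
    if pyIdx s (mid : Int) ≤ x then below s x (mid + 1) hi
    else below s x lo mid
  else lo
termination_by hi - lo
decreasing_by all_goals omega

-- the body of B's `for i, v in enumerate(stones)` loop; state = best
def stepB (s : List Int) (n : Nat) (best : Int) (p : Int × Int) : Int :=
  let c := ((below s (p.2 + (n : Int) - 1) 0 n : Nat) : Int) - p.1
  if c = (n : Int) - 1 ∧ pyIdx s (p.1 + c - 1) - p.2 = (n : Int) - 2 then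
    min best 2
  else
    min best ((n : Int) - c)

def numMovesStonesII_alt (stones : List Int) : List Int :=
  let s := PySem.List.sorted stones (fun x => x) false
  let n := stones.length
  let best := (PySem.List.enumerate s 0).foldl (stepB s n) ((n : Int))
  [best, max (pyIdx s (-1) - pyIdx s 1) (pyIdx s (-2) - pyIdx s 0) - (n : Int) + 2]

-- ===== PRECONDITION & SPEC =====
-- Pre_ excludes lists of length < 2, on which Python A raises IndexError (stones[1] / stones[-2]).
def Pre_numMovesStonesII (stones : List Int) : Prop := 2 ≤ stones.length
instance (stones : List Int) : Decidable (Pre_numMovesStonesII stones) := by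
  unfold Pre_numMovesStonesII; infer_instance

def pvWitness_numMovesStonesII : List Int := [2, 6, 1]

def Spec_numMovesStonesII (stones : List Int) (out : List Int) : Prop :=
  out = numMovesStonesII_alt stones
instance (stones : List Int) (out : List Int) : Decidable (Spec_numMovesStonesII stones out) := by
  unfold Spec_numMovesStonesII; infer_instance

-- ===== CLAIM (what is proved, stated in full; the proofs are below) =====
def Claim_equal_numMovesStonesII : Prop :=
  ∀ (stones : List Int), Dom_numMovesStonesII stones → Pre_numMovesStonesII stones →
    Spec_numMovesStonesII stones (numMovesStonesII stones)

-- ===== LEMMAS AND PROOFS =====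

theorem pyIdx_nat (s : List Int) (k : Nat) (h : k < s.length) : pyIdx s (k : Int) = s[k] := by
  simp [pyIdx, PySem.List.pyGet?_natCast, List.getElem?_eq_getElem h]

-- in a ≤-sorted list, the elements ≤ bound are exactly the first countP of them
theorem sorted_le_iff (s : List Int) (hs : s.Pairwise (· ≤ ·)) (bound : Int) :
    ∀ k, (hk : k < s.length) →
      (s[k] ≤ bound ↔ k < s.countP (fun x => decide (x ≤ bound))) := by
  induction s with
  | nil => intro k hk; simp at hk
  | cons a t ih =>
    rw [List.pairwise_cons] at hs
    intro k hk
    by_cases ha : a ≤ bound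
    · rw [List.countP_cons]
      simp only [ha, decide_true, if_true]
      cases k with
      | zero => simpa using ha
      | succ k =>
        have := ih hs.2 k (by simpa using hk)
        simpa [Nat.succ_lt_succ_iff] using this
    · have ht : t.countP (fun x => decide (x ≤ bound)) = 0 := by
        rw [List.countP_eq_zero]
        intro x hx
        have := hs.1 x hx
        simp; omega
      have hzero : (a :: t).countP (fun x => decide (x ≤ bound)) = 0 := by
        rw [List.countP_cons, ht]
        simp [ha]
      rw [hzero]
      simp only [Nat.not_lt_zero, iff_false]
      cases k with
      | zero => simpa using ha
      | succ k =>
        have hk' : k < t.length := by simpa using hk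
        simp only [List.getElem_cons_succ]
        intro hle
        have := hs.1 _ (List.getElem_mem hk')
        omega

theorem advA_eq (s : List Int) (hs : s.Pairwise (· ≤ ·)) (si : Int) :
    ∀ j, j < s.length → pyIdx s (j : Int) ≤ si + (s.length : Int) - 1 →
      advA s si s.length j = s.countP (fun x => decide (x ≤ si + (s.length : Int) - 1)) - 1 := by
  intro j
  have hcle : s.countP (fun x => decide (x ≤ si + (s.length : Int) - 1)) ≤ s.length :=
    List.countP_le_length
  induction j using advA.induct s si s.length with
  | case1 j h ih =>
    intro hj hle
    rw [advA, dif_pos h]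
    refine ih h.1 ?_
    have h2 := h.2
    push_cast at h2 ⊢
    omega
  | case2 j h =>
    intro hj hle
    rw [advA, dif_neg h]
    have hjc : j < s.countP (fun x => decide (x ≤ si + (s.length : Int) - 1)) := by
      rw [← sorted_le_iff s hs _ j hj, ← pyIdx_nat s j hj]; exact hle
    rcases Nat.lt_or_ge (j + 1) s.length with h1 | h1
    · have hnb : ¬ (pyIdx s ((j : Int) + 1) - si + 1 ≤ (s.length : Int)) := fun hx => h ⟨h1, hx⟩
      have hcast : ((j : Int) + 1) = ((j + 1 : Nat) : Int) := by push_cast; ring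
      rw [hcast, pyIdx_nat s (j + 1) h1] at hnb
      have hgt : ¬ s[j + 1] ≤ si + (s.length : Int) - 1 := by omega
      have := (sorted_le_iff s hs _ (j + 1) h1).not.mp hgt
      omega
    · omega

-- the recursive bisect lands on the same count of in-window stones
theorem below_go (s : List Int) (hs : s.Pairwise (· ≤ ·)) (x : Int) :
    ∀ fuel lo hi, hi - lo ≤ fuel → hi ≤ s.length →
      lo ≤ s.countP (fun y => decide (y ≤ x)) →
      s.countP (fun y => decide (y ≤ x)) ≤ hi →
      below s x lo hi = s.countP (fun y => decide (y ≤ x)) := by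
  intro fuel
  induction fuel with
  | zero =>
    intro lo hi hf hhi hlo hch
    rw [below]
    have h : ¬ (lo < hi) := by omega
    simp only [if_neg h]
    omega
  | succ f ihf =>
    intro lo hi hf hhi hlo hch
    rw [below]
    by_cases h : lo < hi
    · simp only [if_pos h]
      have hmlt : (lo + hi) / 2 < s.length := by omega
      by_cases hle : pyIdx s (((lo + hi) / 2 : Nat) : Int) ≤ x
      · simp only [hle, if_true]
        have hmc : (lo + hi) / 2 < s.countP (fun y => decide (y ≤ x)) := by
          rw [← sorted_le_iff s hs x _ hmlt, ← pyIdx_nat s _ hmlt]; exact hle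
        exact ihf _ _ (by omega) hhi (by omega) hch
      · simp only [hle, if_false]
        have hmc : s.countP (fun y => decide (y ≤ x)) ≤ (lo + hi) / 2 := by
          rcases Nat.lt_or_ge ((lo + hi) / 2) (s.countP (fun y => decide (y ≤ x))) with hx | hx
          · exact absurd (by rw [pyIdx_nat s _ hmlt, sorted_le_iff s hs x _ hmlt]; exact hx) hle
          · exact hx
        exact ihf _ _ (by omega) (by omega) hlo hmc
    · simp only [if_neg h]
      omega

theorem below_eq (s : List Int) (hs : s.Pairwise (· ≤ ·)) (x : Int)
    (hc : s.countP (fun y => decide (y ≤ x)) ≤ s.length) :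
    below s x 0 s.length = s.countP (fun y => decide (y ≤ x)) :=
  below_go s hs x s.length 0 s.length (by omega) le_rfl (by omega) hc

-- the two loops in lockstep: A's running pointer entering each iteration lies inside the
-- window, so the while-loop lands exactly on the window count computed by B (countP - 1)
theorem loop_eq (s : List Int) (hs : s.Pairwise (· ≤ ·)) (n : Nat) (hn : n = s.length) :
    ∀ (k a j : Nat) (ansA ansB : Int), a + k = n → ansA = ansB → j < n →
      (0 < k → pyIdx s (j : Int) ≤ pyIdx s (a : Int) + (n : Int) - 1) →
      ((List.range' a k).foldl (stepA s n) (ansA, j)).1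
        = (List.range' a k).foldl
            (fun acc (i : Nat) => stepB s n acc ((i : Int), pyIdx s (i : Int))) ansB := by
  subst hn
  intro k
  induction k with
  | zero => intro a j ansA ansB _ hans _ _; simpa using hans
  | succ k ih =>
    intro a j ansA ansB hak hans hj hwin
    subst hans
    have ha : a < s.length := by omega
    have hcle : s.countP (fun x => decide (x ≤ pyIdx s (a : Int) + (s.length : Int) - 1))
        ≤ s.length := List.countP_le_length
    have hac : a < s.countP (fun x => decide (x ≤ pyIdx s (a : Int) + (s.length : Int) - 1)) := by
      rw [← sorted_le_iff s hs _ a ha, ← pyIdx_nat s a ha]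
      omega
    set c := s.countP (fun x => decide (x ≤ pyIdx s (a : Int) + (s.length : Int) - 1)) with hc
    have hjA : advA s (pyIdx s (a : Int)) s.length j = c - 1 :=
      advA_eq s hs _ j hj (hwin (by omega))
    have hcast : ((a : Int) + (((c : Nat) : Int) - (a : Int)) - 1) = ((c - 1 : Nat) : Int) := by omega
    have estep : stepA s s.length (ansA, j) a
        = (stepB s s.length ansA ((a : Int), pyIdx s (a : Int)), c - 1) := by
      unfold stepA stepB
      have hrank : below s (pyIdx s (a : Int) + (s.length : Int) - 1) 0 s.length = c :=
        below_eq s hs _ (by omega)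
      simp only [hjA, hrank, hcast]
      by_cases h1 : ((c : Int) - (a : Int) = (s.length : Int) - 1) ∧
          (pyIdx s ((c - 1 : Nat) : Int) - pyIdx s (a : Int) = (s.length : Int) - 2)
      · obtain ⟨hx, hy⟩ := h1
        rw [if_pos ⟨by omega, by omega⟩, if_pos ⟨hx, hy⟩]
      · rw [if_neg (fun h => h1 ⟨by have := h.1; omega, by have := h.2; omega⟩), if_neg h1]
        have hval : (s.length : Int) - ((c - 1 : Nat) : Int) + (a : Int) - 1
            = (s.length : Int) - (((c : Nat) : Int) - (a : Int)) := by omega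
        rw [hval]
    rw [List.range'_succ, List.foldl_cons, List.foldl_cons, estep]
    refine ih (a + 1) (c - 1) _ _ (by omega) rfl (by omega) ?_
    intro hk
    have h1 : c - 1 < s.length := by omega
    have h2 : a + 1 < s.length := by omega
    have hle1 : s[c - 1] ≤ pyIdx s (a : Int) + (s.length : Int) - 1 :=
      (sorted_le_iff s hs _ (c - 1) h1).mpr (by omega)
    have hmono : s[a] ≤ s[a + 1] :=
      List.pairwise_iff_getElem.mp hs a (a + 1) ha h2 (by omega)
    rw [pyIdx_nat s (c - 1) h1, pyIdx_nat s (a + 1) h2]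
    rw [pyIdx_nat s a ha] at hle1
    omega

-- B's fold over enumerate(s) is the fold over indices, feeding (i, s[i]) to the step
theorem enum_foldl (s : List Int) (b : Int) (n : Nat) :
    (PySem.List.enumerate s 0).foldl (stepB s n) b
      = (List.range' 0 s.length).foldl
          (fun acc (i : Nat) => stepB s n acc ((i : Int), pyIdx s (i : Int))) b := by
  rw [PySem.List.enumerate_eq_map_pyRange s 0, List.foldl_map]
  simp only [PySem.List.len_eq]
  rw [PySem.List.pyRange_one 0 (s.length : Int)]
  simp only [Int.sub_zero, Int.toNat_natCast, List.foldl_map, List.range_eq_range', zero_add]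
  refine PySem.List.foldl_congr_mem _ _ _ _ ?_
  intro acc i hi
  have hi' : i < s.length := by
    have := List.mem_range'.mp hi; omega
  simp [pyIdx_nat s i hi', PySem.List.pyGetD_natCast, List.getD,
    List.getElem?_eq_getElem hi']

-- ===== VERDICT (by name: the statement is the Claim_ definition above) =====
theorem numMovesStonesII_spec : Claim_equal_numMovesStonesII := by
  intro stones _ hpre
  unfold Pre_numMovesStonesII at hpre
  unfold Spec_numMovesStonesII numMovesStonesII numMovesStonesII_alt
  simp only [List.cons.injEq, and_true]
  have hs : (PySem.List.sorted stones (fun x => x)).Pairwise (· ≤ ·) := by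
    simpa using PySem.List.sorted_pairwise stones (fun x => x)
  have hlen : stones.length = (PySem.List.sorted stones (fun x => x)).length := by
    simp [PySem.List.length_sorted]
  constructor
  · rw [List.range_eq_range',
      enum_foldl (PySem.List.sorted stones (fun x => x)) (stones.length : Int) stones.length,
      ← hlen]
    refine loop_eq _ hs stones.length hlen stones.length 0 0 _ _ (by omega) rfl (by omega) ?_
    intro _
    omega
  · omega
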